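-- pv_equiv track=rewrite | github.com/djs1193/codeabbey | q105.py | fibonaccidivisor
-- ===== SOURCE A (Python) =====
-- def fibonaccidivisor(m):
--     num = 0
--     fibo = [0,1]
--     i = 0
--     cond = True
--     while cond:
--         num = fibo[i]+fibo[i+1]
--         fibo.append(num)
--         if num % m  == 0:
--             return fibo.index(num)
--             cond = False
--         else:
--             i+=1
-- ===== SOURCE B (Python) =====
-- def fib_pair(n, m):
--     # (F(n) % m, F(n+1) % m) by fast doubling
--     if n == 0:
--         return 0 % m, 1 % m
--     f, g = fib_pair(n // 2, m)
--     c = (f * (2 * g - f)) % m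
--     d = (f * f + g * g) % m
--     if n % 2 == 0:
--         return c, d
--     else:
--         return d, (c + d) % m
--
-- def fibonaccidivisor(m):
--     # Phase 1: Pisano period pi = least n >= 1 with (F(n), F(n+1)) == (F(0), F(1)) mod m.
--     a0, b0 = 0 % m, 1 % m
--     a, b = b0, (a0 + b0) % m
--     pi = 1
--     while (a, b) != (a0, b0):
--         a, b = b, (a + b) % m
--         pi += 1
--     # Phase 2: the answer is the least divisor d of pi with F(d) == 0 mod m
--     # (the indices n with m | F(n) are exactly the multiples of the least one,
--     # which divides pi), computed by fast doubling.
--     d = 1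
--     while True:
--         if pi % d == 0 and fib_pair(d, m)[0] == 0:
--             return d
--         d += 1
-- ===== Notes on version B (the rewrite author's own statement) =====
-- stated objective: faster
-- what changed: B replaces A's single scan over ever-growing big-integer Fibonacci numbers (plus a final list.index pass) by a two-phase number-theoretic algorithm: it first finds the Pisano period pi of m by cycle detection on residue pairs, then returns the smallest divisor d of pi with F(d) == 0 mod m, testing each candidate with fast-doubling Fibonacci mod m; this is correct because the indices n with m | F(n) are exactly the multiples of the least one, which divides pi.
-- outside the precondition, e.g. on fibonaccidivisor(0): A raises ZeroDivisionError, B raises ZeroDivisionError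
import Mathlib
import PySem

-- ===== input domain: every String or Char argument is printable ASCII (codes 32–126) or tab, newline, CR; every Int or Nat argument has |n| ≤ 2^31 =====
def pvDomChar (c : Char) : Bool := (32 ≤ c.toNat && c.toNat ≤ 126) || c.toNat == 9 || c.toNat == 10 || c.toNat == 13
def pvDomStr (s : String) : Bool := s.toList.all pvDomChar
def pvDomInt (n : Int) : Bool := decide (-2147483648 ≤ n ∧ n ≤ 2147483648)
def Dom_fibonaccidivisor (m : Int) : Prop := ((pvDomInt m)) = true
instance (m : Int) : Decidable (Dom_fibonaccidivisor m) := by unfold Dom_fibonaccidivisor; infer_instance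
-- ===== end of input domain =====

-- B replaces A's scan over growing big-integer Fibonacci numbers by a two-phase algorithm:
-- find the Pisano period by cycle detection on residue pairs, then return the least divisor
-- d of the period with F(d) ≡ 0 (mod m), tested by fast-doubling Fibonacci mod m.

-- ===== PORT A =====
-- A's while loop as fuel recursion; fuel |m|^2+3 covers the first Fibonacci divisible by m
-- (proved below via pigeonhole on residue pairs); the -1 branches are unreachable fuel/index guards.
-- fibo[i] and fibo[i+1] are always in range (the list has length i+2 at the top of the loop),
-- so List.getD is exact here.
def fibLoopA (m : Int) : Nat → List Int → Nat → Int
  | 0, _, _ => -1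
  | fuel+1, fibo, i =>
    let num := fibo.getD i 0 + fibo.getD (i+1) 0
    let fibo' := fibo ++ [num]
    if PySem.Int.mod num m = 0 then
      match PySem.List.index? fibo' num with
      | some j => (j : Int)
      | none => -1
    else fibLoopA m fuel fibo' (i+1)

def fibonaccidivisor (m : Int) : Int := fibLoopA m (m.natAbs^2 + 3) [0, 1] 0

-- ===== PORT B =====
-- Source B's fib_pair: (F(n) % m, F(n+1) % m) by fast doubling, recursion on n // 2.
def fibPairB (m : Int) (n : Nat) : Int × Int :=
  if h : n = 0 then (PySem.Int.mod 0 m, PySem.Int.mod 1 m)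
  else
    let p := fibPairB m (n / 2)
    let f := p.1
    let g := p.2
    let c := PySem.Int.mod (f * (2 * g - f)) m
    let d := PySem.Int.mod (f * f + g * g) m
    if n % 2 = 0 then (c, d) else (d, PySem.Int.mod (c + d) m)
  decreasing_by exact Nat.div_lt_self (Nat.pos_of_ne_zero h) one_lt_two

-- Source B's phase-1 while loop as fuel recursion (none = fuel exhausted, unreachable: see the
-- pigeonhole lemma below, which the equivalence proof uses).
def periodLoopB (m a0 b0 : Int) : Nat → Int → Int → Nat → Option Nat
  | 0, _, _, _ => none
  | fuel+1, a, b, n =>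
    if a = a0 ∧ b = b0 then some n
    else periodLoopB m a0 b0 fuel b (PySem.Int.mod (a + b) m) (n+1)

-- Source B's phase-2 'while True' as fuel recursion (-1 = fuel exhausted, unreachable: d = pi
-- always satisfies the test).
def divLoopB (m : Int) (pi : Nat) : Nat → Nat → Int
  | 0, _ => -1
  | fuel+1, d =>
    if pi % d = 0 ∧ (fibPairB m d).1 = 0 then (d : Int)
    else divLoopB m pi fuel (d+1)

def fibonaccidivisor_alt (m : Int) : Int :=
  let a0 := PySem.Int.mod 0 m
  let b0 := PySem.Int.mod 1 m
  match periodLoopB m a0 b0 (m.natAbs^2 + 2) b0 (PySem.Int.mod (a0 + b0) m) 1 with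
  | none => -1
  | some pi => divLoopB m pi (pi + 1) 1

-- ===== PRECONDITION & SPEC =====
-- Pre_ excludes exactly m = 0, on which Python's `num % m` raises ZeroDivisionError (B's `0 % m` too).
def Pre_fibonaccidivisor (m : Int) : Prop := m ≠ 0
instance (m : Int) : Decidable (Pre_fibonaccidivisor m) := by unfold Pre_fibonaccidivisor; infer_instance
def pvWitness_fibonaccidivisor : Int := 7

def Spec_fibonaccidivisor (m : Int) (out : Int) : Prop := out = fibonaccidivisor_alt m
instance (m : Int) (out : Int) : Decidable (Spec_fibonaccidivisor m out) := by unfold Spec_fibonaccidivisor; infer_instance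

-- ===== CLAIM (what is proved, stated in full; the proofs are below) =====
def Claim_equal_fibonaccidivisor : Prop := ∀ (m : Int), Dom_fibonaccidivisor m → Pre_fibonaccidivisor m → Spec_fibonaccidivisor m (fibonaccidivisor m)

-- ===== LEMMAS AND PROOFS =====

-- Python's mod depends only on the argument's residue class modulo m.
theorem pymod_congr (m x y : Int) (h : x % m = y % m) :
    PySem.Int.mod x m = PySem.Int.mod y m := by
  rcases lt_trichotomy m 0 with hm | hm | hm
  · have h1 : PySem.Int.mod x m = -PySem.Int.mod (-x) (-m) := by
      have h := PySem.Int.mod_neg_neg (-x) (-m)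
      simp only [neg_neg] at h
      rw [h]
    have h2 : PySem.Int.mod y m = -PySem.Int.mod (-y) (-m) := by
      have h := PySem.Int.mod_neg_neg (-y) (-m)
      simp only [neg_neg] at h
      rw [h]
    rw [h1, h2, PySem.Int.mod_eq_emod_of_pos (by omega), PySem.Int.mod_eq_emod_of_pos (by omega)]
    have hneg : -x ≡ -y [ZMOD m] := Int.ModEq.neg h
    have : (-x) % m = (-y) % m := hneg
    simp [Int.emod_neg, this]
  · subst hm
    have hx := PySem.Int.floordiv_mul_add_mod x 0
    have hy := PySem.Int.floordiv_mul_add_mod y 0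
    simp at hx hy h
    omega
  · rw [PySem.Int.mod_eq_emod_of_pos hm, PySem.Int.mod_eq_emod_of_pos hm, h]

theorem pymod_emod (m x : Int) : PySem.Int.mod x m % m = x % m := by
  have h := PySem.Int.floordiv_mul_add_mod x m
  have : PySem.Int.mod x m = x - PySem.Int.floordiv x m * m := by linarith
  rw [this, Int.sub_mul_emod_self_right]

theorem pymod_eq_iff (m x y : Int) :
    PySem.Int.mod x m = PySem.Int.mod y m ↔ x ≡ y [ZMOD m] := by
  constructor
  · intro h
    have hx := pymod_emod m x
    have hy := pymod_emod m y
    unfold Int.ModEq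
    rw [← hx, ← hy, h]
  · exact pymod_congr m x y

theorem pymod_add (m x y : Int) :
    PySem.Int.mod (PySem.Int.mod x m + PySem.Int.mod y m) m = PySem.Int.mod (x + y) m := by
  apply pymod_congr
  rw [Int.add_emod (PySem.Int.mod x m), pymod_emod, pymod_emod, ← Int.add_emod]

theorem pymod_self_modEq (m x : Int) : PySem.Int.mod x m ≡ x [ZMOD m] := by
  unfold Int.ModEq
  exact pymod_emod m x

theorem modEq_natAbs (m x y : Int) : x ≡ y [ZMOD m] ↔ x ≡ y [ZMOD (m.natAbs : Int)] := by
  rw [Int.modEq_iff_dvd, Int.modEq_iff_dvd, Int.natAbs_dvd]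

def fibI (n : Nat) : Int := (Nat.fib n : Int)

-- zero residue ↔ |m| divides fib n  (as naturals)
theorem pymod_fib_zero_iff (m : Int) (n : Nat) :
    PySem.Int.mod (fibI n) m = 0 ↔ m.natAbs ∣ Nat.fib n := by
  rw [PySem.Int.mod_eq_zero_iff_dvd, ← Int.natAbs_dvd, fibI, Int.natCast_dvd_natCast]

-- getD on a mapped range
theorem getD_map_range (f : Nat → Int) (n j : Nat) (h : j < n) :
    ((List.range n).map f).getD j 0 = f j := by
  simp [List.getD, h]

-- a Fibonacci number divisible by m with |m| ≥ 2 is at least 2, so it is a fresh element of the list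
theorem two_le_fib_of_dvd (m : Int) (hm : 2 ≤ m.natAbs) (n : Nat) (hn : 0 < n)
    (hd : m ∣ (Nat.fib n : Int)) : 2 ≤ Nat.fib n := by
  have h1 : 1 ≤ Nat.fib n := Nat.fib_pos.mpr hn
  by_contra h
  have hfib1 : Nat.fib n = 1 := by omega
  rw [hfib1] at hd
  have := Int.natAbs_dvd_natAbs.mpr hd
  simp at this
  omega

-- proof-side helper: A's loop over the pair of residues (same state as before, indices only)
def resLoop (m : Int) : Nat → Int → Int → Int → Int
  | 0, _, _, _ => -1
  | fuel+1, a, b, k =>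
    if b = 0 then k else resLoop m fuel b (PySem.Int.mod (a + b) m) (k + 1)

-- lockstep: A's list loop and the residue loop agree step for step (|m| ≥ 2)
theorem lockstep (m : Int) (hm : 2 ≤ m.natAbs) :
    ∀ (fuel : Nat) (i : Nat),
      fibLoopA m fuel ((List.range (i+2)).map fibI) i
        = resLoop m fuel (PySem.Int.mod (fibI (i+1)) m) (PySem.Int.mod (fibI (i+2)) m) ((i : Int) + 2) := by
  intro fuel
  induction fuel with
  | zero => intro i; simp [fibLoopA, resLoop]
  | succ fuel ih =>
    intro i
    have hnum : ((List.range (i+2)).map fibI).getD i 0 + ((List.range (i+2)).map fibI).getD (i+1) 0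
        = fibI (i+2) := by
      rw [getD_map_range _ _ _ (by omega), getD_map_range _ _ _ (by omega)]
      unfold fibI
      rw [Nat.fib_add_two]
      push_cast
      ring
    rw [fibLoopA, resLoop]
    simp only [hnum]
    by_cases h0 : PySem.Int.mod (fibI (i+2)) m = 0
    · rw [if_pos h0, if_pos h0]
      have hd : m ∣ fibI (i+2) := (PySem.Int.mod_eq_zero_iff_dvd _ _).mp h0
      have hfib2 : 2 ≤ Nat.fib (i+2) := two_le_fib_of_dvd m hm (i+2) (by omega) hd
      have hi : 1 ≤ i := by
        by_contra h
        have : i = 0 := by omega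
        subst this
        simp [Nat.fib] at hfib2
      have hnotmem : fibI (i+2) ∉ (List.range (i+2)).map fibI := by
        simp only [List.mem_map, List.mem_range, not_exists]
        rintro t ⟨ht, heq⟩
        have hlt : Nat.fib t < Nat.fib (i+2) := by
          calc Nat.fib t ≤ Nat.fib (i+1) := Nat.fib_mono (by omega)
            _ < Nat.fib (i+2) := Nat.fib_lt_fib_succ (by omega)
        unfold fibI at heq
        omega
      rw [PySem.List.index?_append_singleton_self _ _ hnotmem]
      simp
    · rw [if_neg h0, if_neg h0]
      have hlist : (List.range (i+2)).map fibI ++ [fibI (i+2)]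
          = (List.range (i+1+2)).map fibI := by
        simp [List.range_succ]
      have hfib : fibI (i+1) + fibI (i+2) = fibI (i+1+2) := by
        have h := Nat.fib_add_two (n := i+1)
        unfold fibI
        rw [h]
        push_cast
        ring
      have hb : PySem.Int.mod (PySem.Int.mod (fibI (i+1)) m + PySem.Int.mod (fibI (i+2)) m) m
          = PySem.Int.mod (fibI (i+1+2)) m := by
        rw [pymod_add, hfib]
      rw [hlist, ih (i+1), hb]
      congr 1

-- running the Fibonacci pair backwards from a repeated pair
theorem fib_pair_back (M : Nat) (a b : Nat) (hab : a < b)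
    (h0 : (Nat.fib a : ZMod M) = Nat.fib b) (h1 : (Nat.fib (a+1) : ZMod M) = Nat.fib (b+1)) :
    (Nat.fib (b-a) : ZMod M) = 0 ∧ (Nat.fib (b-a+1) : ZMod M) = 1 := by
  have hdown : ∀ t, t ≤ a →
      (Nat.fib (a-t) : ZMod M) = Nat.fib (b-t) ∧ (Nat.fib (a-t+1) : ZMod M) = Nat.fib (b-t+1) := by
    intro t
    induction t with
    | zero => intro _; simpa using ⟨h0, h1⟩
    | succ t iht =>
      intro ht
      obtain ⟨p0, p1⟩ := iht (by omega)
      have ha : (Nat.fib (a-(t+1)+2) : ZMod M) = Nat.fib (a-(t+1)+1) + Nat.fib (a-(t+1)) := by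
        rw [Nat.fib_add_two]; push_cast; ring
      have hb : (Nat.fib (b-(t+1)+2) : ZMod M) = Nat.fib (b-(t+1)+1) + Nat.fib (b-(t+1)) := by
        rw [Nat.fib_add_two]; push_cast; ring
      have e2 : a-(t+1)+2 = a-t+1 := by omega
      have e3 : a-(t+1)+1 = a-t := by omega
      have e4 : b-(t+1)+2 = b-t+1 := by omega
      have e5 : b-(t+1)+1 = b-t := by omega
      rw [e2, e3] at ha
      rw [e4, e5] at hb
      constructor
      · have hX : (Nat.fib (a-(t+1)) : ZMod M) = (Nat.fib (a-t+1) : ZMod M) - Nat.fib (a-t) := by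
          rw [ha]; ring
        have hY : (Nat.fib (b-(t+1)) : ZMod M) = (Nat.fib (b-t+1) : ZMod M) - Nat.fib (b-t) := by
          rw [hb]; ring
        rw [hX, hY, p0, p1]
      · rw [e3, e5]; exact p0
  obtain ⟨q0, q1⟩ := hdown a le_rfl
  have ea : a - a = 0 := by omega
  rw [ea] at q0 q1
  simp only [Nat.fib_zero, Nat.fib_one, Nat.cast_zero, Nat.cast_one, zero_add] at q0 q1
  exact ⟨q0.symm, q1.symm⟩

-- pigeonhole: the Fibonacci pair sequence mod M returns to (0, 1) within M^2 steps
theorem period_exists (M : Nat) (hM : 0 < M) :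
    ∃ n, 0 < n ∧ n ≤ M^2 ∧ (Nat.fib n : ZMod M) = 0 ∧ (Nat.fib (n+1) : ZMod M) = 1 := by
  haveI : NeZero M := ⟨hM.ne'⟩
  have hcard : Fintype.card (ZMod M × ZMod M) < Fintype.card (Fin (M^2+1)) := by
    rw [Fintype.card_prod, ZMod.card, Fintype.card_fin]
    have : M * M = M^2 := (sq M).symm
    omega
  obtain ⟨i, j, hne, heq⟩ := Fintype.exists_ne_map_eq_of_card_lt
      (fun i : Fin (M^2+1) => ((Nat.fib i.val : ZMod M), (Nat.fib (i.val+1) : ZMod M))) hcard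
  have hcomp := Prod.mk.injEq _ _ _ _ ▸ heq
  rcases lt_or_gt_of_ne (fun h : i.val = j.val => hne (Fin.ext h)) with hij | hij
  · obtain ⟨c0, c1⟩ := Prod.mk.inj heq
    obtain ⟨r0, r1⟩ := fib_pair_back M i.val j.val hij c0 c1
    exact ⟨j.val - i.val, by omega, by have := j.isLt; omega, r0, r1⟩
  · obtain ⟨c0, c1⟩ := Prod.mk.inj heq
    obtain ⟨r0, r1⟩ := fib_pair_back M j.val i.val hij c0.symm c1.symm
    exact ⟨i.val - j.val, by omega, by have := i.isLt; omega, r0, r1⟩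

-- resLoop finds the least zero residue index ≥ k (entered with state (F(k-1), F(k)) mod m)
theorem resLoop_eq (m : Int) :
    ∀ (fuel k j : Nat), 1 ≤ k → k ≤ j → j < k + fuel →
      m.natAbs ∣ Nat.fib j → (∀ t, k ≤ t → t < j → ¬ m.natAbs ∣ Nat.fib t) →
      resLoop m fuel (PySem.Int.mod (fibI (k-1)) m) (PySem.Int.mod (fibI k) m) (k : Int) = (j : Int) := by
  intro fuel
  induction fuel with
  | zero => intro k j _ _ h3 _ _; omega
  | succ fuel ih =>
    intro k j h1 h2 h3 hj hmin
    rw [resLoop]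
    by_cases hz : PySem.Int.mod (fibI k) m = 0
    · rw [if_pos hz]
      have hk : m.natAbs ∣ Nat.fib k := (pymod_fib_zero_iff m k).mp hz
      have hkj : k = j := by
        by_contra hne
        exact hmin k le_rfl (by omega) hk
      rw [hkj]
    · rw [if_neg hz]
      have hkj : k < j := by
        rcases eq_or_lt_of_le h2 with he | hl
        · exact absurd ((pymod_fib_zero_iff m k).mpr (he ▸ hj)) hz
        · exact hl
      have hfib : fibI (k-1) + fibI k = fibI (k+1) := by
        unfold fibI
        have h := Nat.fib_add_two (n := k-1)
        have e1 : k - 1 + 2 = k + 1 := by omega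
        have e2 : k - 1 + 1 = k := by omega
        rw [e1, e2] at h
        rw [h]; push_cast; ring
      have hb : PySem.Int.mod (PySem.Int.mod (fibI (k-1)) m + PySem.Int.mod (fibI k) m) m
          = PySem.Int.mod (fibI (k+1)) m := by rw [pymod_add, hfib]
      rw [hb]
      have hrec := ih (k+1) j (by omega) (by omega) (by omega) hj
        (fun t ht1 ht2 => hmin t (by omega) ht2)
      have e : ((k:Int)+1) = (((k+1 : Nat)) : Int) := by push_cast; ring
      rw [e]
      simpa [Nat.add_sub_cancel] using hrec

-- periodLoopB finds the least period index ≥ n (entered with state (F(n), F(n+1)) mod m)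
theorem periodLoopB_eq (m : Int) :
    ∀ (fuel n p : Nat), 1 ≤ n → n ≤ p → p < n + fuel →
      (PySem.Int.mod (fibI p) m = PySem.Int.mod 0 m ∧ PySem.Int.mod (fibI (p+1)) m = PySem.Int.mod 1 m) →
      (∀ t, n ≤ t → t < p → ¬ (PySem.Int.mod (fibI t) m = PySem.Int.mod 0 m ∧ PySem.Int.mod (fibI (t+1)) m = PySem.Int.mod 1 m)) →
      periodLoopB m (PySem.Int.mod 0 m) (PySem.Int.mod 1 m) fuel
        (PySem.Int.mod (fibI n) m) (PySem.Int.mod (fibI (n+1)) m) n = some p := by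
  intro fuel
  induction fuel with
  | zero => intro n p _ _ h3 _ _; omega
  | succ fuel ih =>
    intro n p h1 h2 h3 hp hmin
    rw [periodLoopB]
    by_cases hc : PySem.Int.mod (fibI n) m = PySem.Int.mod 0 m ∧
        PySem.Int.mod (fibI (n+1)) m = PySem.Int.mod 1 m
    · rw [if_pos hc]
      have hnp : n = p := by
        by_contra hne
        exact hmin n le_rfl (by omega) hc
      rw [hnp]
    · rw [if_neg hc]
      have hnp : n < p := by
        rcases eq_or_lt_of_le h2 with he | hl
        · subst he; exact absurd hp hc
        · exact hl
      have hfib : fibI n + fibI (n+1) = fibI (n+2) := by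
        unfold fibI; rw [Nat.fib_add_two]; push_cast; ring
      have hb : PySem.Int.mod (PySem.Int.mod (fibI n) m + PySem.Int.mod (fibI (n+1)) m) m
          = PySem.Int.mod (fibI (n+2)) m := by rw [pymod_add, hfib]
      rw [hb]
      exact ih (n+1) p (by omega) (by omega) (by omega) hp
        (fun t ht1 ht2 => hmin t (by omega) ht2)

-- fast doubling is correct: fibPairB m n = (F(n) mod m, F(n+1) mod m)
theorem fibPairB_eq (m : Int) (n : Nat) :
    fibPairB m n = (PySem.Int.mod (fibI n) m, PySem.Int.mod (fibI (n+1)) m) := by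
  induction n using Nat.strong_induction_on with
  | _ n ih =>
    rw [fibPairB]
    by_cases h : n = 0
    · subst h
      simp [fibI]
    · rw [dif_neg h]
      have hrec := ih (n/2) (Nat.div_lt_self (Nat.pos_of_ne_zero h) one_lt_two)
      simp only [hrec]
      have hf := pymod_self_modEq m (fibI (n/2))
      have hg := pymod_self_modEq m (fibI (n/2+1))
      have hc : PySem.Int.mod (PySem.Int.mod (fibI (n/2)) m *
            (2 * PySem.Int.mod (fibI (n/2+1)) m - PySem.Int.mod (fibI (n/2)) m)) m
          = PySem.Int.mod (fibI (2*(n/2))) m := by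
        rw [pymod_eq_iff]
        have hfe : fibI (2*(n/2)) = fibI (n/2) * (2 * fibI (n/2+1) - fibI (n/2)) := by
          have hle : Nat.fib (n/2) ≤ 2 * Nat.fib (n/2+1) := by
            have := Nat.fib_le_fib_succ (n := n/2)
            omega
          unfold fibI
          rw [Nat.fib_two_mul, Nat.cast_mul, Nat.cast_sub hle]
          push_cast; ring
        rw [hfe]
        exact hf.mul (((Int.ModEq.refl 2).mul hg).sub hf)
      have hd : PySem.Int.mod (PySem.Int.mod (fibI (n/2)) m * PySem.Int.mod (fibI (n/2)) m +
            PySem.Int.mod (fibI (n/2+1)) m * PySem.Int.mod (fibI (n/2+1)) m) m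
          = PySem.Int.mod (fibI (2*(n/2)+1)) m := by
        rw [pymod_eq_iff]
        have hfe : fibI (2*(n/2)+1) = fibI (n/2) * fibI (n/2) + fibI (n/2+1) * fibI (n/2+1) := by
          unfold fibI
          rw [Nat.fib_two_mul_add_one]
          push_cast; ring
        rw [hfe]
        exact (hf.mul hf).add (hg.mul hg)
      by_cases hpar : n % 2 = 0
      · rw [if_pos hpar]
        have he : 2*(n/2) = n := by omega
        rw [hc, hd, he]
      · rw [if_neg hpar]
        have he : 2*(n/2)+1 = n := by omega
        have hsum : PySem.Int.mod (PySem.Int.mod (fibI (2*(n/2))) m +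
              PySem.Int.mod (fibI (2*(n/2)+1)) m) m = PySem.Int.mod (fibI (2*(n/2)+2)) m := by
          rw [pymod_add]
          have : fibI (2*(n/2)) + fibI (2*(n/2)+1) = fibI (2*(n/2)+2) := by
            unfold fibI; rw [Nat.fib_add_two]; push_cast; ring
          rw [this]
        rw [hc, hd, hsum, he]
        have he2 : 2*(n/2)+2 = n+1 := by omega
        rw [he2]

-- divLoopB finds the least d ≥ start dividing pi with zero Fibonacci residue
theorem divLoopB_eq (m : Int) (p : Nat) :
    ∀ (fuel d j : Nat), 1 ≤ d → d ≤ j → j < d + fuel →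
      (p % j = 0 ∧ m.natAbs ∣ Nat.fib j) →
      (∀ t, d ≤ t → t < j → ¬ (p % t = 0 ∧ m.natAbs ∣ Nat.fib t)) →
      divLoopB m p fuel d = (j : Int) := by
  intro fuel
  induction fuel with
  | zero => intro d j _ _ h3 _ _; omega
  | succ fuel ih =>
    intro d j h1 h2 h3 hj hmin
    rw [divLoopB]
    have hpair : (fibPairB m d).1 = PySem.Int.mod (fibI d) m := by rw [fibPairB_eq]
    by_cases hc : p % d = 0 ∧ m.natAbs ∣ Nat.fib d
    · have hc' : p % d = 0 ∧ (fibPairB m d).1 = 0 := by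
        rw [hpair]
        exact ⟨hc.1, (pymod_fib_zero_iff m d).mpr hc.2⟩
      rw [if_pos hc']
      have hdj : d = j := by
        by_contra hne
        exact hmin d le_rfl (by omega) hc
      rw [hdj]
    · have hc' : ¬ (p % d = 0 ∧ (fibPairB m d).1 = 0) := by
        rw [hpair]
        intro ⟨hx, hy⟩
        exact hc ⟨hx, (pymod_fib_zero_iff m d).mp hy⟩
      rw [if_neg hc']
      have hdj : d < j := by
        rcases eq_or_lt_of_le h2 with he | hl
        · subst he; exact absurd hj hc
        · exact hl
      exact ih (d+1) j (by omega) (by omega) (by omega) hj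
        (fun t ht1 ht2 => hmin t (by omega) ht2)

-- gcd closure: the least index with M | fib divides every such index (Nat.fib_gcd)
theorem alpha_dvd (M : Nat) (hE : ∃ n, 0 < n ∧ M ∣ Nat.fib n) :
    ∀ n, 0 < n → M ∣ Nat.fib n → Nat.find hE ∣ n := by
  intro n hn hd
  obtain ⟨hp, hdp⟩ := Nat.find_spec hE
  have hg : M ∣ Nat.fib (Nat.gcd (Nat.find hE) n) := by
    rw [Nat.fib_gcd]; exact Nat.dvd_gcd hdp hd
  have hg0 : 0 < Nat.gcd (Nat.find hE) n := Nat.gcd_pos_of_pos_left _ hp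
  have hle : Nat.find hE ≤ Nat.gcd (Nat.find hE) n := Nat.find_min' hE ⟨hg0, hg⟩
  have hge : Nat.gcd (Nat.find hE) n ≤ Nat.find hE :=
    Nat.le_of_dvd hp (Nat.gcd_dvd_left _ _)
  have heq : Nat.gcd (Nat.find hE) n = Nat.find hE := le_antisymm hge hle
  rw [← heq]
  exact Nat.gcd_dvd_right _ _

-- ===== VERDICT (by name: the statement is the Claim_ definition above) =====
theorem fibonaccidivisor_spec : Claim_equal_fibonaccidivisor := by
  intro m _ hpre
  unfold Spec_fibonaccidivisor
  by_cases hm1 : m = 1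
  · subst hm1
    have hfp : (fibPairB 1 1).1 = 0 := by rw [fibPairB_eq]; decide
    have hB1 : fibonaccidivisor_alt 1 = 1 := by
      unfold fibonaccidivisor_alt
      norm_num [periodLoopB, divLoopB, hfp]
    have hA1 : fibonaccidivisor 1 = 1 := by decide
    rw [hA1, hB1]
  by_cases hmn1 : m = -1
  · subst hmn1
    have hfp : (fibPairB (-1) 1).1 = 0 := by rw [fibPairB_eq]; decide
    have hB1 : fibonaccidivisor_alt (-1) = 1 := by
      unfold fibonaccidivisor_alt
      norm_num [periodLoopB, divLoopB, hfp]
      decide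
    have hA1 : fibonaccidivisor (-1) = 1 := by decide
    rw [hA1, hB1]
  have hm0 : m ≠ 0 := hpre
  have hM2 : 2 ≤ m.natAbs := by omega
  have hM1 : 0 < m.natAbs := by omega
  -- bridges between residue equalities and divisibility / ZMod facts
  have hzd : ∀ n : Nat, ((Nat.fib n : ZMod m.natAbs) = 0) ↔ m.natAbs ∣ Nat.fib n :=
    fun n => ZMod.natCast_eq_zero_iff _ _
  have hbr0 : ∀ n : Nat,
      (PySem.Int.mod (fibI n) m = PySem.Int.mod 0 m) ↔ m.natAbs ∣ Nat.fib n := by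
    intro n
    rw [pymod_eq_iff, modEq_natAbs, ← ZMod.intCast_eq_intCast_iff]
    unfold fibI
    push_cast
    exact hzd n
  have hbr1 : ∀ n : Nat,
      (PySem.Int.mod (fibI n) m = PySem.Int.mod 1 m) ↔ ((Nat.fib n : ZMod m.natAbs) = 1) := by
    intro n
    rw [pymod_eq_iff, modEq_natAbs, ← ZMod.intCast_eq_intCast_iff]
    unfold fibI
    push_cast
    exact Iff.rfl
  obtain ⟨n0, hn0pos, hn0le, hz0, hz1⟩ := period_exists m.natAbs hM1
  -- α = least n > 0 with |m| | fib n
  have hE : ∃ n, 0 < n ∧ m.natAbs ∣ Nat.fib n := ⟨n0, hn0pos, (hzd n0).mp hz0⟩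
  obtain ⟨hαpos, hαdvd⟩ := Nat.find_spec hE
  have hαle : Nat.find hE ≤ n0 := Nat.find_min' hE ⟨hn0pos, (hzd n0).mp hz0⟩
  have hα3 : 3 ≤ Nat.find hE := by
    by_contra h
    have hle2 : Nat.find hE = 1 ∨ Nat.find hE = 2 := by omega
    rcases hle2 with he | he <;> rw [he] at hαdvd
    · rw [Nat.fib_one, Nat.dvd_one] at hαdvd; omega
    · rw [Nat.fib_two, Nat.dvd_one] at hαdvd; omega
  -- π = least n > 0 with pair return (Pisano period)
  have hQE : ∃ n, 0 < n ∧ (PySem.Int.mod (fibI n) m = PySem.Int.mod 0 m ∧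
      PySem.Int.mod (fibI (n+1)) m = PySem.Int.mod 1 m) :=
    ⟨n0, hn0pos, (hbr0 n0).mpr ((hzd n0).mp hz0), (hbr1 (n0+1)).mpr hz1⟩
  obtain ⟨hπpos, hπQ⟩ := Nat.find_spec hQE
  have hπle : Nat.find hQE ≤ n0 := Nat.find_min' hQE
    ⟨hn0pos, (hbr0 n0).mpr ((hzd n0).mp hz0), (hbr1 (n0+1)).mpr hz1⟩
  have hπzero : m.natAbs ∣ Nat.fib (Nat.find hQE) := (hbr0 _).mp hπQ.1
  have hαπ : Nat.find hE ∣ Nat.find hQE := alpha_dvd m.natAbs hE _ hπpos hπzero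
  have hαleπ : Nat.find hE ≤ Nat.find hQE := Nat.le_of_dvd hπpos hαπ
  -- A returns α
  have hA : fibonaccidivisor m = (Nat.find hE : Int) := by
    unfold fibonaccidivisor
    have hlist : ([0, 1] : List Int) = (List.range (0+2)).map fibI := by decide
    rw [hlist]
    have hls := lockstep m hM2 (m.natAbs^2+3) 0
    rw [hls]
    have hres := resLoop_eq m (m.natAbs^2+3) 2 (Nat.find hE) (by omega) (by omega) (by omega)
        hαdvd (fun t ht1 ht2 hdvd => Nat.find_min hE ht2 ⟨by omega, hdvd⟩)
    norm_num at hres ⊢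
    exact hres
  -- B returns α
  have hB : fibonaccidivisor_alt m = (Nat.find hE : Int) := by
    show (match periodLoopB m (PySem.Int.mod 0 m) (PySem.Int.mod 1 m) (m.natAbs ^ 2 + 2)
        (PySem.Int.mod 1 m) (PySem.Int.mod (PySem.Int.mod 0 m + PySem.Int.mod 1 m) m) 1 with
      | none => -1
      | some pi => divLoopB m pi (pi + 1) 1) = (Nat.find hE : Int)
    have hper := periodLoopB_eq m (m.natAbs^2+2) 1 (Nat.find hQE) (by omega) (by omega)
        (by omega) hπQ (fun t ht1 ht2 hQ => Nat.find_min hQE ht2 ⟨by omega, hQ⟩)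
    have e1 : PySem.Int.mod (fibI 1) m = PySem.Int.mod 1 m := by norm_num [fibI]
    have e2 : PySem.Int.mod (fibI (1+1)) m
        = PySem.Int.mod (PySem.Int.mod 0 m + PySem.Int.mod 1 m) m := by
      rw [pymod_add]
      norm_num [fibI]
    rw [e1, e2] at hper
    rw [hper]
    have hdiv := divLoopB_eq m (Nat.find hQE) (Nat.find hQE + 1) 1 (Nat.find hE)
        (by omega) (by omega) (by omega)
        ⟨Nat.dvd_iff_mod_eq_zero.mp hαπ, hαdvd⟩
        (fun t ht1 ht2 ht => Nat.find_min hE ht2 ⟨by omega, ht.2⟩)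
    exact hdiv
  rw [hA, hB]
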